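-- pv_equiv track=rewrite | github.com/xrsrke/pipegoose | tests/nn/pipeline_parallel_2/sync/test_progress_tracker.py | get_gpipe_schedules
-- ===== SOURCE A (Python) =====
-- def get_task(microbatch_idx, partition_idx):
--     return (microbatch_idx, partition_idx)
--
-- def get_gpipe_schedules(n_partitions, n_microbatches):
--     n_clock_cycles = n_partitions + n_microbatches - 1
--     schedules = []
--     for clock_idx in range(n_clock_cycles):
--         start_partrition = max(clock_idx + 1 - n_microbatches, 0)
--         end_partition = min(clock_idx + 1, n_partitions)
--         tasks = []
--         for partition_idx in range(start_partrition, end_partition):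
--             microbatch_idx = clock_idx - partition_idx
--             task = get_task(microbatch_idx, partition_idx)
--             tasks.append(task)
--
--         schedules.append(tasks)
--
--     return schedules
-- ===== SOURCE B (Python) =====
-- def get_gpipe_schedules(n_partitions, n_microbatches):
--     # Diagonal fill: pre-allocate one empty row per clock cycle, then walk the
--     # (partition, microbatch) grid once, dropping each task into its clock row.
--     schedules = [[] for _ in range(n_partitions + n_microbatches - 1)]
--     if n_partitions <= 0 or n_microbatches <= 0:
--         return schedules  # no tasks to place
--     for partition_idx in range(n_partitions):
--         for microbatch_idx in range(n_microbatches):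
--             schedules[microbatch_idx + partition_idx].append((microbatch_idx, partition_idx))
--     return schedules
-- ===== Notes on version B (the rewrite author's own statement) =====
-- stated objective: alternative
-- what changed: Instead of computing per-clock partition bounds with max/min and building each cycle's task list separately, B pre-allocates all clock rows and fills them by a single diagonal sweep over the (partition, microbatch) grid, appending each task at row microbatch+partition.
import Mathlib
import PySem

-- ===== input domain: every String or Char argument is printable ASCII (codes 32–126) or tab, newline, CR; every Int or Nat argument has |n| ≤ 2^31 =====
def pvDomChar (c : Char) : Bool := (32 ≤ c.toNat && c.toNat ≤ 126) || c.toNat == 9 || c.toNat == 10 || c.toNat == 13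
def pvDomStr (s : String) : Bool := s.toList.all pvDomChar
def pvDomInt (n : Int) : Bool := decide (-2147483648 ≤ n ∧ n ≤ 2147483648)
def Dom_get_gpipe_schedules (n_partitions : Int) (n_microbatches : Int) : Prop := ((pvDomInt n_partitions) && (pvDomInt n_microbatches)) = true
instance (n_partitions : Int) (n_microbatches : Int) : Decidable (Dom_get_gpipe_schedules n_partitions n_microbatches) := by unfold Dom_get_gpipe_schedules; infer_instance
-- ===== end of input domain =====

-- B replaces A's per-clock bound computation (max/min over each cycle) by pre-allocating
-- all clock rows and filling them in one diagonal sweep of the (partition, microbatch) grid.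

-- ===== PORT A =====
def get_task (microbatch_idx : Int) (partition_idx : Int) : Int × Int :=
  (microbatch_idx, partition_idx)

def get_gpipe_schedules (n_partitions : Int) (n_microbatches : Int) : List (List (Int × Int)) :=
  let n_clock_cycles := n_partitions + n_microbatches - 1
  (PySem.List.pyRange 0 n_clock_cycles 1).foldl (fun schedules clock_idx =>
    let start_partrition := max (clock_idx + 1 - n_microbatches) 0
    let end_partition := min (clock_idx + 1) n_partitions
    let tasks := (PySem.List.pyRange start_partrition end_partition 1).foldl
      (fun tasks partition_idx => tasks ++ [get_task (clock_idx - partition_idx) partition_idx]) []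
    schedules ++ [tasks]) []

-- ===== PORT B =====
-- schedules[i].append(x): in every reachable iteration 0 ≤ i < len(schedules), where
-- pyGetD/pySetD are exact (Python's xs[i] / in-place append on the row at i).
def pvAppendAt (sched : List (List (Int × Int))) (i : Int) (x : Int × Int) : List (List (Int × Int)) :=
  PySem.List.pySetD sched i (PySem.List.pyGetD sched i [] ++ [x])

def get_gpipe_schedules_alt (n_partitions : Int) (n_microbatches : Int) : List (List (Int × Int)) :=
  let init := (PySem.List.pyRange 0 (n_partitions + n_microbatches - 1) 1).map
    (fun _ => ([] : List (Int × Int)))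
  if n_partitions ≤ 0 ∨ n_microbatches ≤ 0 then init else  -- no tasks to place
  (PySem.List.pyRange 0 n_partitions 1).foldl (fun sched partition_idx =>
    (PySem.List.pyRange 0 n_microbatches 1).foldl (fun sched microbatch_idx =>
      pvAppendAt sched (microbatch_idx + partition_idx) (microbatch_idx, partition_idx)) sched) init

-- ===== PRECONDITION & SPEC =====
def Spec_get_gpipe_schedules (n_partitions : Int) (n_microbatches : Int) (out : List (List (Int × Int))) : Prop := out = get_gpipe_schedules_alt n_partitions n_microbatches
instance (n_partitions : Int) (n_microbatches : Int) (out : List (List (Int × Int))) : Decidable (Spec_get_gpipe_schedules n_partitions n_microbatches out) := by unfold Spec_get_gpipe_schedules; infer_instance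

-- ===== CLAIM (what is proved, stated in full; the proofs are below) =====
def Claim_equal_get_gpipe_schedules : Prop := ∀ (n_partitions : Int) (n_microbatches : Int), Dom_get_gpipe_schedules n_partitions n_microbatches → Spec_get_gpipe_schedules n_partitions n_microbatches (get_gpipe_schedules n_partitions n_microbatches)

-- ===== LEMMAS AND PROOFS =====

-- The task row A builds for clock cycle c.
def pvRow (n_partitions n_microbatches c : Int) : List (Int × Int) :=
  (PySem.List.pyRange (max (c + 1 - n_microbatches) 0) (min (c + 1) n_partitions) 1).map
    (fun p => (c - p, p))

lemma pvA_eq_map (np nm : Int) :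
    get_gpipe_schedules np nm =
      (PySem.List.pyRange 0 (np + nm - 1) 1).map (fun c => pvRow np nm c) := by
  simp only [get_gpipe_schedules, pvRow, get_task,
    PySem.List.foldl_append_singleton_eq_map, List.nil_append]

lemma pvRange_toNat (n : Int) :
    PySem.List.pyRange 0 n 1 = PySem.List.pyRange 0 (n.toNat : Int) 1 := by
  rw [PySem.List.pyRange_one, PySem.List.pyRange_one]
  congr 2
  omega

-- Effect of B's inner loop (fixed partition p) on an arbitrary schedule list.
lemma pvInner (M p : Nat) (sched : List (List (Int × Int))) :
    ((PySem.List.pyRange 0 (M : Int) 1).foldl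
        (fun s m => pvAppendAt s (m + (p : Int)) (m, (p : Int))) sched).length = sched.length ∧
    ∀ c : Nat, c < sched.length →
      ((PySem.List.pyRange 0 (M : Int) 1).foldl
        (fun s m => pvAppendAt s (m + (p : Int)) (m, (p : Int))) sched).getD c [] =
      sched.getD c [] ++
        (if (p : Int) ≤ (c : Int) ∧ (c : Int) < (p : Int) + (M : Int)
         then [((c : Int) - (p : Int), (p : Int))] else []) := by
  induction M with
  | zero =>
    rw [show ((0 : Nat) : Int) = 0 from rfl, PySem.List.pyRange_one_eq_nil le_rfl]
    refine ⟨rfl, fun c hc => ?_⟩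
    rw [if_neg (by omega)]
    simp
  | succ M ih =>
    obtain ⟨ihl, ihg⟩ := ih
    rw [show ((M + 1 : Nat) : Int) = (M : Int) + 1 from by push_cast; ring,
      PySem.List.pyRange_one_succ_right (by positivity), List.foldl_append]
    set r := (PySem.List.pyRange 0 (M : Int) 1).foldl
      (fun s m => pvAppendAt s (m + (p : Int)) (m, (p : Int))) sched with hr
    simp only [List.foldl_cons, List.foldl_nil, pvAppendAt]
    rw [show (M : Int) + (p : Int) = ((M + p : Nat) : Int) from by push_cast; ring]
    simp only [PySem.List.pySetD_natCast, PySem.List.pyGetD_natCast]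
    refine ⟨by simpa using ihl, fun c hc => ?_⟩
    by_cases hcmp : c = M + p
    · have hlt : M + p < r.length := by omega
      subst hcmp
      rw [List.getD_eq_getElem _ _ (by simpa [List.length_set] using hlt),
        List.getElem_set_self, List.getD_eq_getElem _ _ hlt, ← List.getD_eq_getElem r,
        ihg _ (by omega), if_neg (by omega), if_pos (by constructor <;> push_cast <;> omega)]
      push_cast
      simp [add_sub_cancel_right]
    · have hlt : c < r.length := by omega
      rw [List.getD_eq_getElem _ _ (by simpa [List.length_set] using hlt),
        List.getElem_set_ne (by omega), ← List.getD_eq_getElem r, ihg _ (by omega)]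
      congr 1
      have : ((p : Int) ≤ (c : Int) ∧ (c : Int) < (p : Int) + ((M : Int) + 1)) ↔
          ((p : Int) ≤ (c : Int) ∧ (c : Int) < (p : Int) + (M : Int)) := by omega
      rw [if_congr this rfl rfl]

-- Growing the row by one partition.
lemma pvRow_step (N : Nat) (nm : Int) (c : Nat) :
    pvRow ((N : Int) + 1) nm (c : Int) =
      pvRow (N : Int) nm (c : Int) ++
        (if (N : Int) ≤ (c : Int) ∧ (c : Int) < (N : Int) + (nm.toNat : Int)
         then [((c : Int) - (N : Int), (N : Int))] else []) := by
  unfold pvRow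
  split_ifs with h
  · rw [show min ((c : Int) + 1) ((N : Int) + 1) = (N : Int) + 1 from by omega,
      show min ((c : Int) + 1) (N : Int) = (N : Int) from by omega,
      PySem.List.pyRange_one_succ_right (by omega), List.map_append]
    simp
  · by_cases hcN : (c : Int) < (N : Int)
    · rw [show min ((c : Int) + 1) ((N : Int) + 1) = min ((c : Int) + 1) (N : Int) from by omega]
      simp
    · rw [PySem.List.pyRange_one_eq_nil (show min ((c : Int) + 1) ((N : Int) + 1) ≤ _ from by omega),
        PySem.List.pyRange_one_eq_nil (show min ((c : Int) + 1) (N : Int) ≤ _ from by omega)]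
      simp

-- Effect of B's outer loop on an arbitrary schedule list.
lemma pvOuter (N : Nat) (nm : Int) (sched : List (List (Int × Int))) :
    ((PySem.List.pyRange 0 (N : Int) 1).foldl (fun s pi =>
        (PySem.List.pyRange 0 nm 1).foldl
          (fun s m => pvAppendAt s (m + pi) (m, pi)) s) sched).length = sched.length ∧
    ∀ c : Nat, c < sched.length →
      ((PySem.List.pyRange 0 (N : Int) 1).foldl (fun s pi =>
        (PySem.List.pyRange 0 nm 1).foldl
          (fun s m => pvAppendAt s (m + pi) (m, pi)) s) sched).getD c [] =
      sched.getD c [] ++ pvRow (N : Int) nm (c : Int) := by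
  induction N with
  | zero =>
    rw [show ((0 : Nat) : Int) = 0 from rfl, PySem.List.pyRange_one_eq_nil le_rfl]
    refine ⟨rfl, fun c hc => ?_⟩
    unfold pvRow
    rw [PySem.List.pyRange_one_eq_nil
      (show min ((c : Int) + 1) 0 ≤ max ((c : Int) + 1 - nm) 0 from by omega)]
    simp
  | succ N ih =>
    obtain ⟨ihl, ihg⟩ := ih
    rw [show ((N + 1 : Nat) : Int) = (N : Int) + 1 from by push_cast; ring,
      PySem.List.pyRange_one_succ_right (by positivity), List.foldl_append]
    set r := (PySem.List.pyRange 0 (N : Int) 1).foldl (fun s pi =>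
      (PySem.List.pyRange 0 nm 1).foldl
        (fun s m => pvAppendAt s (m + pi) (m, pi)) s) sched with hr
    simp only [List.foldl_cons, List.foldl_nil]
    rw [pvRange_toNat nm]
    obtain ⟨hl2, hg2⟩ := pvInner nm.toNat N r
    refine ⟨by rw [hl2, ihl], fun c hc => ?_⟩
    rw [hg2 c (by omega), ihg c hc, pvRow_step, List.append_assoc]

-- With no partitions or no microbatches every clock row is empty.
lemma pvRow_nil (np nm c : Int) (h : np ≤ 0 ∨ nm ≤ 0) : pvRow np nm c = [] := by
  unfold pvRow
  rw [PySem.List.pyRange_one_eq_nil (show min (c + 1) np ≤ max (c + 1 - nm) 0 from by omega)]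
  rfl

-- pvRow is unchanged by clamping a negative partition count to 0.
lemma pvRow_toNat (np nm : Int) (c : Nat) :
    pvRow ((np.toNat : Nat) : Int) nm (c : Int) = pvRow np nm (c : Int) := by
  by_cases h : 0 ≤ np
  · rw [Int.toNat_of_nonneg h]
  · unfold pvRow
    rw [PySem.List.pyRange_one_eq_nil
        (show min ((c : Int) + 1) ((np.toNat : Nat) : Int) ≤ max ((c : Int) + 1 - nm) 0 from by
          omega),
      PySem.List.pyRange_one_eq_nil
        (show min ((c : Int) + 1) np ≤ max ((c : Int) + 1 - nm) 0 from by omega)]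

-- ===== VERDICT (by name: the statement is the Claim_ definition above) =====
theorem get_gpipe_schedules_spec : Claim_equal_get_gpipe_schedules := by
  intro np nm _
  unfold Spec_get_gpipe_schedules
  simp only [get_gpipe_schedules_alt]
  rw [pvA_eq_map]
  by_cases hg : np ≤ 0 ∨ nm ≤ 0
  · rw [if_pos hg]
    exact List.map_congr_left (fun c _ => pvRow_nil np nm c hg)
  rw [if_neg hg, pvRange_toNat np]
  obtain ⟨hlen, hget⟩ := pvOuter np.toNat nm
    ((PySem.List.pyRange 0 (np + nm - 1) 1).map (fun _ => ([] : List (Int × Int))))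
  have hinitlen : ((PySem.List.pyRange 0 (np + nm - 1) 1).map
      (fun _ => ([] : List (Int × Int)))).length = (np + nm - 1).toNat := by
    simp [PySem.List.length_pyRange_one]
  apply List.ext_getElem
  · rw [hlen]
    simp [PySem.List.length_pyRange_one]
  · intro c h1 h2
    have hc : c < ((PySem.List.pyRange 0 (np + nm - 1) 1).map
        (fun _ => ([] : List (Int × Int)))).length := by omega
    have e2 := hget c hc
    rw [List.getD_eq_getElem _ _ h2,
      List.getD_eq_getElem _ _ hc, List.getElem_map] at e2
    rw [List.getElem_map, PySem.List.getElem_pyRange_one, zero_add, e2, List.nil_append,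
      pvRow_toNat]
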